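-- pv_equiv track=rewrite | github.com/gautetk/AoC-2020 | src/day7.py | bagsInBags1
-- ===== SOURCE A (Python) =====
-- def bagsInBags1(rules, myBag):
--     oldBags = set([myBag])
--     c = set()
--     while oldBags:
--         newBags = set()
--         for bag in oldBags:
--             if bag in rules:
--                 for b in rules[bag]:
--                     newBags.add(b)
--                     c.add(b)
--         oldBags = newBags
--     return len(c)
-- ===== SOURCE B (Python) =====
-- def bagsInBags1(rules, myBag):
--     # Monotone closure: repeatedly recompute the children of every bag known to be
--     # reachable (plus myBag) until nothing new appears.  Each productive round
--     # discovers at least one new rule key, so len(rules) + 1 rounds always reach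
--     # the fixpoint, i.e. the full set of bags reachable from myBag in >= 1 step.
--     reach = set()
--     for _ in range(len(rules) + 1):
--         new = {child for bag in [myBag, *reach] for child in rules.get(bag, ())}
--         if new <= reach:
--             break
--         reach |= new
--     return len(reach)
-- ===== Notes on version B (the rewrite author's own statement) =====
-- stated objective: alternative
-- what changed: Replaces A's frontier-level expansion (which re-derives each level from the previous frontier only and loops forever on cyclic rules) by a bounded monotone closure iteration that recomputes the children of the whole known reachable set each round and stops at a fixpoint or after len(rules)+1 rounds, which provably suffices to reach the transitive closure; B terminates on every input.
import Mathlib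
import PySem

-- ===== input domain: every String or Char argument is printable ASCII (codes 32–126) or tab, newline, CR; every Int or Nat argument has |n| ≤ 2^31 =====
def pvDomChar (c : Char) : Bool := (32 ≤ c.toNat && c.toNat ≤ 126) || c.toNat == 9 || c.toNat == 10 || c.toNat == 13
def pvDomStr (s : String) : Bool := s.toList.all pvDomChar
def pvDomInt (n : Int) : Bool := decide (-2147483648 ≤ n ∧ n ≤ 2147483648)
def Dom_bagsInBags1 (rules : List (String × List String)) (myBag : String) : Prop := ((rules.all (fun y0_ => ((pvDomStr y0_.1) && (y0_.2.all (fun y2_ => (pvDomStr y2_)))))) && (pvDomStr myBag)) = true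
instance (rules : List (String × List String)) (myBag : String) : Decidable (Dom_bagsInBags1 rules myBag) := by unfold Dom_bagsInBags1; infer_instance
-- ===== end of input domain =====

-- B replaces A's frontier-only level expansion by a bounded monotone closure iteration over the
-- whole known reachable set (objective: alternative).  The return values are proved equal on every
-- input; where Python's A loops forever (a cycle reachable from myBag) its fueled port returns the
-- closure count, which is B's value there too.

-- ===== PORT A =====
-- one body of A's inner 'for bag in oldBags: if bag in rules: for b in rules[bag]: …'
def bagsAStep (rules : List (String × List String))
    (st : PySem.Set String × PySem.Set String) (bag : String) :
    PySem.Set String × PySem.Set String :=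
  match PySem.Dict.get? (PySem.Dict.mk rules) bag with
  | some bs => bs.foldl (fun st2 b => (PySem.Set.add st2.1 b, PySem.Set.add st2.2 b)) st
  | none => st

-- A's 'while oldBags:' loop.  The Python loop has no bound; whenever it terminates it runs at
-- most rules.length + 2 rounds (proved below via path shortening), so the fuel is only a totality
-- device and never changes the result where the Python returns.
def bagsALoop (rules : List (String × List String)) :
    Nat → PySem.Set String → PySem.Set String → PySem.Set String
  | 0, _, c => c
  | fuel+1, oldBags, c =>
    if oldBags = [] then c
    else
      let st := oldBags.foldl (bagsAStep rules) (PySem.Set.empty, c)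
      bagsALoop rules fuel st.1 st.2

def bagsInBags1 (rules : List (String × List String)) (myBag : String) : Int :=
  PySem.Set.len (bagsALoop rules (rules.length + 2) (PySem.Set.ofList [myBag]) PySem.Set.empty)

-- ===== PORT B =====
-- rules.get(bag, ())
def childrenOf (rules : List (String × List String)) (bag : String) : List String :=
  (PySem.Dict.get? (PySem.Dict.mk rules) bag).getD []

-- {child for bag in [myBag, *reach] for child in rules.get(bag, ())}
def bagsBNew (rules : List (String × List String)) (myBag : String)
    (reach : PySem.Set String) : PySem.Set String :=
  (myBag :: reach).foldl (fun acc bag => PySem.Set.update acc (childrenOf rules bag)) PySem.Set.empty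

-- B's 'for _ in range(len(rules)+1): … if new <= reach: break; reach |= new'
def bagsBLoop (rules : List (String × List String)) (myBag : String) :
    Nat → PySem.Set String → PySem.Set String
  | 0, reach => reach
  | fuel+1, reach =>
    let nw := bagsBNew rules myBag reach
    if PySem.Set.issubset nw reach then reach
    else bagsBLoop rules myBag fuel (PySem.Set.union reach nw)

def bagsInBags1_alt (rules : List (String × List String)) (myBag : String) : Int :=
  PySem.Set.len (bagsBLoop rules myBag (rules.length + 1) PySem.Set.empty)

-- ===== PRECONDITION & SPEC =====
def Spec_bagsInBags1 (rules : List (String × List String)) (myBag : String) (out : Int) : Prop := out = bagsInBags1_alt rules myBag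
instance (rules : List (String × List String)) (myBag : String) (out : Int) : Decidable (Spec_bagsInBags1 rules myBag out) := by unfold Spec_bagsInBags1; infer_instance

-- ===== CLAIM (what is proved, stated in full; the proofs are below) =====
def Claim_equal_bagsInBags1 : Prop := ∀ (rules : List (String × List String)) (myBag : String), Dom_bagsInBags1 rules myBag → Spec_bagsInBags1 rules myBag (bagsInBags1 rules myBag)

-- ===== LEMMAS AND PROOFS =====

-- x reachable from root in exactly n steps of the rules graph
inductive PvReach (rules : List (String × List String)) (root : String) : Nat → String → Prop
  | zero : PvReach rules root 0 root
  | step {n : Nat} {b c : String} :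
      PvReach rules root n b → c ∈ childrenOf rules b → PvReach rules root (n + 1) c

-- reachable in between 1 and i steps
def PvCSet (rules : List (String × List String)) (root : String) (i : Nat) (x : String) : Prop :=
  ∃ k, 1 ≤ k ∧ k ≤ i ∧ PvReach rules root k x

-- reachable in at least one step
def PvPlus (rules : List (String × List String)) (root : String) (x : String) : Prop :=
  ∃ k, 1 ≤ k ∧ PvReach rules root k x

theorem pvReach_zero_iff (rules : List (String × List String)) (root x : String) :
    PvReach rules root 0 x ↔ x = root := by
  constructor
  · intro h; cases h; rfl
  · rintro rfl; exact .zero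

theorem pvReach_succ_iff (rules : List (String × List String)) (root : String) (n : Nat) (x : String) :
    PvReach rules root (n + 1) x ↔ ∃ b, PvReach rules root n b ∧ x ∈ childrenOf rules b := by
  constructor
  · intro h; cases h with | step h e => exact ⟨_, h, e⟩
  · rintro ⟨b, h, e⟩; exact .step h e

theorem pvReach_empty_above (rules : List (String × List String)) (root : String) (i : Nat)
    (h : ∀ x, ¬ PvReach rules root i x) :
    ∀ k, i ≤ k → ∀ x, ¬ PvReach rules root k x := by
  intro k hik
  induction k, hik using Nat.le_induction with
  | base => exact h
  | succ k _ ih =>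
    intro x hx
    rw [pvReach_succ_iff] at hx
    obtain ⟨b, hb, _⟩ := hx
    exact ih b hb

-- both inner set-building loops are Set.update folds
theorem pvPairfold (bs : List String) (st : PySem.Set String × PySem.Set String) :
    bs.foldl (fun st2 b => (PySem.Set.add st2.1 b, PySem.Set.add st2.2 b)) st
      = (PySem.Set.update st.1 bs, PySem.Set.update st.2 bs) := by
  induction bs generalizing st with
  | nil => simp [PySem.Set.update_nil]
  | cons b bs ih => simp [List.foldl_cons, ih, PySem.Set.update_cons]

theorem pvStepA_eq (rules : List (String × List String))
    (st : PySem.Set String × PySem.Set String) (bag : String) :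
    bagsAStep rules st bag
      = (PySem.Set.update st.1 (childrenOf rules bag), PySem.Set.update st.2 (childrenOf rules bag)) := by
  unfold bagsAStep childrenOf
  cases h : PySem.Dict.get? (PySem.Dict.mk rules) bag with
  | none => simp [PySem.Set.update_nil]
  | some bs => simp [pvPairfold]

theorem pvFoldA_eq (rules : List (String × List String)) (l : List String)
    (st : PySem.Set String × PySem.Set String) :
    l.foldl (bagsAStep rules) st
      = (l.foldl (fun s bag => PySem.Set.update s (childrenOf rules bag)) st.1,
         l.foldl (fun s bag => PySem.Set.update s (childrenOf rules bag)) st.2) := by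
  induction l generalizing st with
  | nil => simp
  | cons a l ih => simp [List.foldl_cons, pvStepA_eq, ih]

theorem pvFoldUpd_mem (g : String → List String) (l : List String) (s : PySem.Set String) (x : String) :
    x ∈ l.foldl (fun s bag => PySem.Set.update s (g bag)) s ↔ x ∈ s ∨ ∃ bag ∈ l, x ∈ g bag := by
  induction l generalizing s with
  | nil => simp
  | cons a l ih =>
    rw [List.foldl_cons, ih, PySem.Set.mem_update]
    constructor
    · rintro (( h | h) | ⟨bag, hb, hx⟩)
      · exact .inl h
      · exact .inr ⟨a, by simp, h⟩
      · exact .inr ⟨bag, by simp [hb], hx⟩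
    · rintro (h | ⟨bag, hb, hx⟩)
      · exact .inl (.inl h)
      · rcases List.mem_cons.mp hb with rfl | hb
        · exact .inl (.inr hx)
        · exact .inr ⟨bag, hb, hx⟩

theorem pvFoldUpd_nodup (g : String → List String) (l : List String) (s : PySem.Set String)
    (h : s.Nodup) : (l.foldl (fun s bag => PySem.Set.update s (g bag)) s).Nodup := by
  induction l generalizing s with
  | nil => exact h
  | cons a l ih => exact ih _ (PySem.Set.nodup_update _ _ h)

-- edges only leave keys of the rules dict
theorem pvGet?_some_mem (rules : List (String × List String)) (a : String) (bs : List String)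
    (h : PySem.Dict.get? (PySem.Dict.mk rules) a = some bs) : a ∈ rules.map Prod.fst := by
  induction rules with
  | nil => simp [PySem.Dict.get?] at h
  | cons p rest ih =>
    rw [PySem.Dict.get?_mk_cons] at h
    by_cases hp : p.1 == a
    · simp [List.mem_map]
      exact .inl (by simpa using (eq_of_beq hp).symm)
    · simp [hp] at h
      simp [List.mem_map] at ih ⊢
      exact .inr (ih h)

theorem pvEdge_mem_keys (rules : List (String × List String)) {a b : String}
    (h : b ∈ childrenOf rules a) : a ∈ rules.map Prod.fst := by
  unfold childrenOf at h
  cases hg : PySem.Dict.get? (PySem.Dict.mk rules) a with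
  | none => rw [hg] at h; simp at h
  | some bs => exact pvGet?_some_mem rules a bs hg

theorem pvChainKeys (rules : List (String × List String)) {l : List String}
    (hc : List.IsChain (fun a b => b ∈ childrenOf rules a) l) :
    ∀ x ∈ l.dropLast, x ∈ rules.map Prod.fst := by
  intro x hx
  rw [List.mem_iff_getElem] at hx
  obtain ⟨i, hi, hxe⟩ := hx
  have hlen : l.dropLast.length = l.length - 1 := List.length_dropLast (xs := l)
  have hi' : i + 1 < l.length := by omega
  have hedge := List.isChain_iff_getElem.mp hc i hi'
  have hdl : l.dropLast[i] = l[i]'(by omega) := List.getElem_dropLast ..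
  rw [← hxe, hdl]
  exact pvEdge_mem_keys rules hedge

theorem pvNodupBound {l d : List String} (h : l.Nodup) (hs : ∀ x ∈ l, x ∈ d) :
    l.length ≤ d.length :=
  calc l.length = l.toFinset.card := (List.toFinset_card_of_nodup h).symm
  _ ≤ d.toFinset.card := Finset.card_le_card (by
        intro x hx; rw [List.mem_toFinset] at hx ⊢; exact hs x hx)
  _ ≤ d.length := List.toFinset_card_le d

theorem pvDupSplit : ∀ (l : List String), ¬ l.Nodup → ∃ u x v w, l = u ++ x :: v ++ x :: w := by
  intro l
  induction l with
  | nil => intro h; exact absurd List.nodup_nil h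
  | cons a l ih =>
    intro h
    by_cases ha : a ∈ l
    · obtain ⟨s, t, rfl⟩ := List.append_of_mem ha
      exact ⟨[], a, s, t, rfl⟩
    · have hl : ¬ l.Nodup := by
        intro hnd; exact h (List.nodup_cons.mpr ⟨ha, hnd⟩)
      obtain ⟨u, x, v, w, rfl⟩ := ih hl
      exact ⟨a :: u, x, v, w, rfl⟩

-- cut a repeated vertex out of a chain, keeping head and last
theorem pvShorten (rules : List (String × List String)) (root b : String) {l : List String}
    (hc : List.IsChain (fun a b => b ∈ childrenOf rules a) l)
    (hh : l.head? = some root) (hl : l.getLast? = some b)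
    (hlen : rules.length + 2 ≤ l.length) :
    ∃ l', l'.length < l.length ∧ 2 ≤ l'.length ∧
      List.IsChain (fun a b => b ∈ childrenOf rules a) l' ∧
      l'.head? = some root ∧ l'.getLast? = some b := by
  have hne : l ≠ [] := by rintro rfl; simp at hl
  have hnd : ¬ (l.dropLast).Nodup := by
    intro hnd
    have hb := pvNodupBound hnd (pvChainKeys rules hc)
    rw [List.length_dropLast, List.length_map] at hb
    omega
  obtain ⟨u, x, v, w, hsplit⟩ := pvDupSplit _ hnd
  have hbl : l.getLast hne = b := by
    have := List.getLast?_eq_some_getLast (l := l) hne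
    rw [this] at hl; exact Option.some.inj hl
  have hl2 : l = u ++ x :: v ++ x :: (w ++ [b]) := by
    conv_lhs => rw [← List.dropLast_append_getLast hne]
    rw [hsplit, hbl]; simp
  have hl3 : l = (u ++ x :: v) ++ (x :: (w ++ [b])) := by rw [hl2]
  rw [hl3] at hc
  obtain ⟨hc1, hc2, _⟩ := List.isChain_append.mp hc
  obtain ⟨hcu, _, hedgeu⟩ := List.isChain_append.mp (by simpa using hc1 :
    List.IsChain (fun a b => b ∈ childrenOf rules a) (u ++ (x :: v)))
  refine ⟨u ++ x :: (w ++ [b]), ?_, ?_, ?_, ?_, ?_⟩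
  · rw [hl3]; simp only [List.length_append, List.length_cons]; omega
  · simp only [List.length_append, List.length_cons]; omega
  · exact List.isChain_append.mpr ⟨hcu, hc2, by
      intro p hp q hq
      simp at hq; subst hq
      exact hedgeu p hp x (by simp)⟩
  · cases u with
    | nil =>
      rw [hl3] at hh; simp at hh ⊢; exact hh
    | cons a u' =>
      rw [hl3] at hh; simp at hh ⊢; exact hh
  · have : u ++ x :: (w ++ [b]) = (u ++ x :: w) ++ [b] := by simp
    rw [this, List.getLast?_concat]

theorem pvChainBound (rules : List (String × List String)) (root b : String) :
    ∀ n (l : List String), l.length ≤ n → 2 ≤ l.length →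
      List.IsChain (fun a b => b ∈ childrenOf rules a) l →
      l.head? = some root → l.getLast? = some b →
      ∃ l', 2 ≤ l'.length ∧ l'.length ≤ rules.length + 2 ∧
        List.IsChain (fun a b => b ∈ childrenOf rules a) l' ∧
        l'.head? = some root ∧ l'.getLast? = some b := by
  intro n
  induction n with
  | zero => intro l h1 h2 _ _ _; omega
  | succ n ih =>
    intro l h1 h2 hc hh hl
    by_cases hle : l.length ≤ rules.length + 2
    · exact ⟨l, h2, hle, hc, hh, hl⟩
    · obtain ⟨l', hlt, h2', hc', hh', hl'⟩ := pvShorten rules root b hc hh hl (by omega)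
      exact ih l' (by omega) h2' hc' hh' hl'

theorem pvReach_iff_chain (rules : List (String × List String)) (root : String) (k : Nat) (x : String) :
    PvReach rules root k x ↔
      ∃ l : List String, l.length = k + 1 ∧
        List.IsChain (fun a b => b ∈ childrenOf rules a) l ∧
        l.head? = some root ∧ l.getLast? = some x := by
  constructor
  · intro h
    induction h with
    | zero => exact ⟨[root], by simp, by simp, rfl, rfl⟩
    | @step n b c _ e ih =>
      obtain ⟨l, hlen, hc, hh, hl⟩ := ih
      have hne : l ≠ [] := by rintro rfl; simp at hlen
      refine ⟨l ++ [c], by simp [hlen], ?_, ?_, List.getLast?_concat⟩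
      · exact List.isChain_append.mpr ⟨hc, by simp, by
          intro p hp q hq
          simp at hq; subst hq
          rw [hl] at hp; simp at hp; subst hp; exact e⟩
      · rw [List.head?_append, hh]; rfl
  · intro h
    induction k generalizing x with
    | zero =>
      obtain ⟨l, hlen, _, hh, hl⟩ := h
      obtain ⟨a, rfl⟩ := List.length_eq_one_iff.mp hlen
      simp at hh hl
      subst hl; subst hh
      exact .zero
    | succ k ih =>
      obtain ⟨l, hlen, hc, hh, hl⟩ := h
      have hne : l ≠ [] := by rintro rfl; simp at hlen
      have hdl : l = l.dropLast ++ [l.getLast hne] := (List.dropLast_append_getLast hne).symm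
      have hx : l.getLast hne = x := by
        have := List.getLast?_eq_some_getLast (l := l) hne
        rw [this] at hl; exact Option.some.inj hl
      have hdne : l.dropLast ≠ [] := by
        intro h0
        have := List.length_dropLast (xs := l)
        rw [h0] at this; simp at this; omega
      rw [hdl] at hc
      obtain ⟨hc1, _, hedge⟩ := List.isChain_append.mp hc
      have hgl : l.dropLast.getLast? = some (l.dropLast.getLast hdne) :=
        List.getLast?_eq_some_getLast hdne
      have hr : PvReach rules root k (l.dropLast.getLast hdne) := by
        apply ih
        refine ⟨l.dropLast, ?_, hc1, ?_, hgl⟩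
        · have := List.length_dropLast (xs := l); omega
        · rw [hdl, List.head?_append] at hh
          cases hhd : l.dropLast.head? with
          | none => exact absurd (List.head?_eq_none_iff.mp hhd) hdne
          | some a0 => rw [hhd] at hh; simpa using hh
      have hexe : x ∈ childrenOf rules (l.dropLast.getLast hdne) := by
        have := hedge _ hgl x (by simp [hx])
        simpa [hx] using this
      exact .step hr hexe

theorem pvSat (rules : List (String × List String)) (root x : String) (k : Nat)
    (hk : 1 ≤ k) (h : PvReach rules root k x) : PvCSet rules root (rules.length + 1) x := by
  obtain ⟨l, hlen, hc, hh, hl⟩ := (pvReach_iff_chain rules root k x).mp h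
  obtain ⟨l', h2, hle, hc', hh', hl'⟩ :=
    pvChainBound rules root x l.length l le_rfl (by omega) hc hh hl
  have hr : PvReach rules root (l'.length - 1) x := by
    apply (pvReach_iff_chain rules root (l'.length - 1) x).mpr
    exact ⟨l', by omega, hc', hh', hl'⟩
  exact ⟨l'.length - 1, by omega, by omega, hr⟩

theorem pvCSet_succ_iff (rules : List (String × List String)) (root : String) (i : Nat) (x : String) :
    PvCSet rules root (i + 1) x ↔ PvCSet rules root i x ∨ PvReach rules root (i + 1) x := by
  constructor
  · rintro ⟨k, hk1, hk2, h⟩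
    by_cases hki : k ≤ i
    · exact .inl ⟨k, hk1, hki, h⟩
    · have : k = i + 1 := by omega
      exact .inr (this ▸ h)
  · rintro (⟨k, hk1, hk2, h⟩ | h)
    · exact ⟨k, hk1, by omega, h⟩
    · exact ⟨i + 1, by omega, le_rfl, h⟩

theorem pvCSet_mono (rules : List (String × List String)) (root : String) {i j : Nat}
    (hij : i ≤ j) {x : String} (h : PvCSet rules root i x) : PvCSet rules root j x := by
  obtain ⟨k, hk1, hk2, h⟩ := h
  exact ⟨k, hk1, by omega, h⟩

theorem pvCSet_plus_iff (rules : List (String × List String)) (root : String) (j : Nat)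
    (hj : rules.length + 1 ≤ j) (x : String) :
    PvCSet rules root j x ↔ PvPlus rules root x := by
  constructor
  · rintro ⟨k, hk1, _, h⟩; exact ⟨k, hk1, h⟩
  · rintro ⟨k, hk1, h⟩
    exact pvCSet_mono rules root hj (pvSat rules root x k hk1 h)

theorem pvStab (rules : List (String × List String)) (root : String) (i : Nat)
    (hsub : ∀ x, PvCSet rules root (i + 1) x → PvCSet rules root i x) :
    ∀ k x, 1 ≤ k → PvReach rules root k x → PvCSet rules root i x := by
  intro k
  induction k using Nat.strong_induction_on with
  | _ k ih =>
    intro x hk h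
    by_cases hki : k ≤ i + 1
    · exact hsub x ⟨k, hk, hki, h⟩
    · obtain ⟨k', rfl⟩ : ∃ k', k = k' + 1 := ⟨k - 1, by omega⟩
      rw [pvReach_succ_iff] at h
      obtain ⟨b, hb, he⟩ := h
      have hcb := ih k' (by omega) b (by omega) hb
      obtain ⟨m, hm1, hm2, hmr⟩ := hcb
      exact hsub x ⟨m + 1, by omega, by omega, .step hmr he⟩

-- characterization of A's loop
theorem pvALoop (rules : List (String × List String)) (root : String) :
    ∀ fuel i (oldBags c : PySem.Set String),
      i + fuel = rules.length + 2 →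
      oldBags.Nodup → c.Nodup →
      (∀ x, x ∈ oldBags ↔ PvReach rules root i x) →
      (∀ x, x ∈ c ↔ PvCSet rules root i x) →
      (bagsALoop rules fuel oldBags c).Nodup ∧
        (∀ x, x ∈ bagsALoop rules fuel oldBags c ↔ PvPlus rules root x) := by
  intro fuel
  induction fuel with
  | zero =>
    intro i oldBags c hif _ hcnd _ hcm
    refine ⟨hcnd, fun x => (hcm x).trans ?_⟩
    exact pvCSet_plus_iff rules root i (by omega) x
  | succ fuel ih =>
    intro i oldBags c hif hond hcnd hom hcm
    by_cases ho : oldBags = []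
    · rw [bagsALoop, if_pos ho]
      refine ⟨hcnd, fun x => (hcm x).trans ⟨fun h => ?_, fun h => ?_⟩⟩
      · obtain ⟨k, hk1, _, h⟩ := h; exact ⟨k, hk1, h⟩
      · obtain ⟨k, hk1, h⟩ := h
        have hemp : ∀ y, ¬ PvReach rules root i y := by
          intro y hy
          have := (hom y).mpr hy
          simp [ho] at this
        have hki : k < i := by
          by_contra hge
          exact pvReach_empty_above rules root i hemp k (by omega) x h
        exact ⟨k, hk1, by omega, h⟩
    · rw [bagsALoop, if_neg ho]
      have hfold := pvFoldA_eq rules oldBags (PySem.Set.empty, c)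
      rw [hfold]
      apply ih (i + 1)
      · omega
      · exact pvFoldUpd_nodup _ _ _ List.nodup_nil
      · exact pvFoldUpd_nodup _ _ _ hcnd
      · intro x
        rw [pvFoldUpd_mem, pvReach_succ_iff]
        simp only [PySem.Set.empty]
        constructor
        · rintro (h | ⟨bag, hb, hx⟩)
          · simp at h
          · exact ⟨bag, (hom bag).mp hb, hx⟩
        · rintro ⟨b, hb, he⟩
          exact .inr ⟨b, (hom b).mpr hb, he⟩
      · intro x
        rw [pvFoldUpd_mem, pvCSet_succ_iff, pvReach_succ_iff]
        constructor
        · rintro (h | ⟨bag, hb, hx⟩)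
          · exact .inl ((hcm x).mp h)
          · exact .inr ⟨bag, (hom bag).mp hb, hx⟩
        · rintro (h | ⟨b, hb, he⟩)
          · exact .inl ((hcm x).mpr h)
          · exact .inr ⟨b, (hom b).mpr hb, he⟩

-- membership of B's per-round set comprehension
theorem pvBNew_mem (rules : List (String × List String)) (root : String) (i : Nat)
    (reach : PySem.Set String) (hm : ∀ x, x ∈ reach ↔ PvCSet rules root i x) (x : String) :
    x ∈ bagsBNew rules root reach ↔ PvCSet rules root (i + 1) x := by
  unfold bagsBNew
  rw [pvFoldUpd_mem]
  simp only [PySem.Set.empty, List.not_mem_nil, false_or, List.mem_cons]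
  constructor
  · rintro ⟨bag, (rfl | hb), hx⟩
    · exact ⟨1, le_rfl, by omega, .step .zero hx⟩
    · obtain ⟨k, hk1, hk2, h⟩ := (hm bag).mp hb
      exact ⟨k + 1, by omega, by omega, .step h hx⟩
  · rintro ⟨k, hk1, hk2, h⟩
    obtain ⟨k', rfl⟩ : ∃ k', k = k' + 1 := ⟨k - 1, by omega⟩
    rw [pvReach_succ_iff] at h
    obtain ⟨b, hb, he⟩ := h
    cases k' with
    | zero =>
      exact ⟨b, .inl ((pvReach_zero_iff rules root b).mp hb), he⟩
    | succ m =>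
      exact ⟨b, .inr ((hm b).mpr ⟨m + 1, by omega, by omega, hb⟩), he⟩

-- characterization of B's loop
theorem pvBLoop (rules : List (String × List String)) (root : String) :
    ∀ fuel i (reach : PySem.Set String),
      i + fuel = rules.length + 1 →
      reach.Nodup →
      (∀ x, x ∈ reach ↔ PvCSet rules root i x) →
      (bagsBLoop rules root fuel reach).Nodup ∧
        (∀ x, x ∈ bagsBLoop rules root fuel reach ↔ PvPlus rules root x) := by
  intro fuel
  induction fuel with
  | zero =>
    intro i reach hif hnd hm
    refine ⟨hnd, fun x => (hm x).trans ?_⟩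
    exact pvCSet_plus_iff rules root i (by omega) x
  | succ fuel ih =>
    intro i reach hif hnd hm
    rw [bagsBLoop]
    have hnw := pvBNew_mem rules root i reach hm
    by_cases hsb : PySem.Set.issubset (bagsBNew rules root reach) reach = true
    · rw [if_pos hsb]
      have hsub : ∀ x, PvCSet rules root (i + 1) x → PvCSet rules root i x := by
        intro x hx
        exact (hm x).mp ((PySem.Set.issubset_iff _ _).mp hsb x ((hnw x).mpr hx))
      refine ⟨hnd, fun x => (hm x).trans ⟨fun h => ?_, fun h => ?_⟩⟩
      · obtain ⟨k, hk1, _, h⟩ := h; exact ⟨k, hk1, h⟩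
      · obtain ⟨k, hk1, h⟩ := h
        exact pvStab rules root i hsub k x hk1 h
    · rw [if_neg hsb]
      apply ih (i + 1)
      · omega
      · exact PySem.Set.nodup_union _ _ hnd
      · intro x
        rw [PySem.Set.mem_union, hm x, hnw x, pvCSet_succ_iff]
        tauto

-- the two ports compute the same value on every input
theorem pvMainEq (rules : List (String × List String)) (myBag : String) :
    bagsInBags1 rules myBag = bagsInBags1_alt rules myBag := by
  obtain ⟨ndA, memA⟩ := pvALoop rules myBag (rules.length + 2) 0
      (PySem.Set.ofList [myBag]) PySem.Set.empty (by omega)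
      (PySem.Set.nodup_ofList _) List.nodup_nil
      (by
        intro x
        rw [PySem.Set.mem_ofList, pvReach_zero_iff]
        simp)
      (by
        intro x
        simp only [PySem.Set.empty, List.not_mem_nil, false_iff]
        rintro ⟨k, hk1, hk2, _⟩; omega)
  obtain ⟨ndB, memB⟩ := pvBLoop rules myBag (rules.length + 1) 0 PySem.Set.empty (by omega)
      List.nodup_nil
      (by
        intro x
        simp only [PySem.Set.empty, List.not_mem_nil, false_iff]
        rintro ⟨k, hk1, hk2, _⟩; omega)
  unfold bagsInBags1 bagsInBags1_alt
  have hperm : (bagsALoop rules (rules.length + 2) (PySem.Set.ofList [myBag]) PySem.Set.empty).Perm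
      (bagsBLoop rules myBag (rules.length + 1) PySem.Set.empty) :=
    (List.perm_ext_iff_of_nodup ndA ndB).mpr (fun x => (memA x).trans (memB x).symm)
  simp only [PySem.Set.len]
  exact_mod_cast hperm.length_eq

-- ===== VERDICT (by name: the statement is the Claim_ definition above) =====
theorem bagsInBags1_spec : Claim_equal_bagsInBags1 := by
  intro rules myBag _
  unfold Spec_bagsInBags1
  exact pvMainEq rules myBag
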